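-- pv_equiv track=rewrite | github.com/dpasquini/FreebaseGNN | utils/FreebaseIndex.py | get_diversified_sample
-- ===== SOURCE A (Python) =====
-- from collections import defaultdict
--
-- def get_diversified_sample(connections, max_sample_size=15):
--     """
--     Creates a diversified sample from a list of connection tuples.
--
--     This function prioritizes variety by taking items from each predicate group
--     in a round-robin fashion until the max sample size is reached.
--     """
--     # Remove duplicate (predicate, object) pairs to start with variety.
--     # Sorting makes the output deterministic.
--     unique_connections = sorted(list(set(connections)))
--
--     # If we're already under the limit, no sampling is needed.
--     if len(unique_connections) <= max_sample_size:
--         return unique_connections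
--
--     # Group connections by their predicate to ensure we sample from each type.
--     grouped_by_predicate = defaultdict(list)
--     for pred, obj in unique_connections:
--         grouped_by_predicate[pred].append(obj)
--
--     # Perform round-robin sampling to build the final list.
--     sample = []
--     predicates = list(grouped_by_predicate.keys())
--     # Find the length of the largest group to set the loop boundary.
--     max_len = max(len(v) for v in grouped_by_predicate.values())
--
--     for i in range(max_len):
--         # Stop if the sample is full.
--         if len(sample) >= max_sample_size:
--             break
--         for pred in predicates:
--             # Add an item from each predicate group if it exists at this index.
--             if i < len(grouped_by_predicate[pred]):
--                 obj = grouped_by_predicate[pred][i]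
--                 sample.append((pred, obj))
--                 if len(sample) >= max_sample_size:
--                     break
--     return sample
-- ===== SOURCE B (Python) =====
-- from collections import Counter
--
-- def get_diversified_sample(connections, max_sample_size=15):
--     """Schedule-by-sort: annotate each unique connection with its round number
--     (its rank within its predicate), then one stable sort by (round, predicate)
--     yields the whole round-robin order; slice off the sample."""
--     unique_connections = sorted(set(connections))
--
--     if len(unique_connections) <= max_sample_size:
--         return unique_connections
--
--     seen = Counter()
--     ranked = []
--     for pred, obj in unique_connections:
--         ranked.append((seen[pred], pred, obj))
--         seen[pred] += 1
--
--     # Sorting by (round, predicate) interleaves the predicate groups round-robin.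
--     ranked.sort(key=lambda t: (t[0], t[1]))
--     return [(pred, obj) for _, pred, obj in ranked[:max(0, max_sample_size)]]
-- ===== Notes on version B (the rewrite author's own statement) =====
-- stated objective: alternative
-- what changed: B replaces A's grouping dict plus nested round-robin loops (outer over indices, inner over predicates, with fullness breaks) by a scheduling sort: each unique connection is annotated with its round number (rank within its predicate) in one counting pass, a single stable sort by (round, predicate) produces the entire round-robin order, and the sample is a slice of it.
import Mathlib
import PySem

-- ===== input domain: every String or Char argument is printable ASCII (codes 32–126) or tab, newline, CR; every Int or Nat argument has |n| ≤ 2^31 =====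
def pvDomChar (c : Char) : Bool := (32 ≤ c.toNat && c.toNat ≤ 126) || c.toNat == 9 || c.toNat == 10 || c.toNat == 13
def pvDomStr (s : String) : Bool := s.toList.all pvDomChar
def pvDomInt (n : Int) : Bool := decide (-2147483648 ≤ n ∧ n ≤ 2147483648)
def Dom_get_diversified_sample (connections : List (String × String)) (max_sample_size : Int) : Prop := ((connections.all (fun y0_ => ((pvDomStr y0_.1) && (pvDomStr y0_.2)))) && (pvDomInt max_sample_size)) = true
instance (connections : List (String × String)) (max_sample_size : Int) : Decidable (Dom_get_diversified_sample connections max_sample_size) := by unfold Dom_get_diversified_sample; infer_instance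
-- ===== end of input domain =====

-- B replaces A's nested round-robin loops over a grouping dict by a scheduling sort:
-- annotate each unique connection with its round (rank within its predicate), one
-- stable sort by (round, predicate), then slice (objective: alternative).


-- ===== PORT A =====
-- A's inner loop: for pred in predicates: append grouped[pred][i] if it exists; break when full
def pvAInner (d : PySem.Dict String (List String)) (m : Int) (i : Nat) :
    List String → List (String × String) → List (String × String)
  | [], sample => sample
  | pred :: preds, sample =>
    if h : i < (PySem.Dict.getD d pred []).length then
      let sample' := sample ++ [(pred, (PySem.Dict.getD d pred [])[i])]
      if m ≤ (sample'.length : Int) then sample'          -- inner break: sample is full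
      else pvAInner d m i preds sample'
    else pvAInner d m i preds sample

-- A's outer loop: for i in range(max_len), re-checking fullness at each i
def pvAOuter (d : PySem.Dict String (List String)) (m : Int) (preds : List String) :
    List Nat → List (String × String) → List (String × String)
  | [], sample => sample
  | i :: is, sample =>
    if m ≤ (sample.length : Int) then sample
    else pvAOuter d m preds is (pvAInner d m i preds sample)

def get_diversified_sample (connections : List (String × String)) (max_sample_size : Int) :
    List (String × String) :=
  let unique := PySem.List.sorted2 (PySem.Set.ofList connections) Prod.fst Prod.snd false
  if (unique.length : Int) ≤ max_sample_size then unique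
  else
    let grouped := unique.foldl
      (fun d p => PySem.Dict.modify d p.1 [] (· ++ [p.2])) PySem.Dict.empty
    match PySem.List.max? (grouped.values.map (fun v => (v.length : Int))) (fun x => x) with
    | none => []      -- Python raises ValueError here (max() of an empty sequence); outside Pre_
    | some maxLen =>  -- range(max_len) over a non-negative int, as a Nat-index loop
        pvAOuter grouped max_sample_size grouped.keys (List.range maxLen.toNat) []

-- ===== PORT B =====
def get_diversified_sample_alt (connections : List (String × String)) (max_sample_size : Int) :
    List (String × String) :=
  let unique := PySem.List.sorted2 (PySem.Set.ofList connections) Prod.fst Prod.snd false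
  if (unique.length : Int) ≤ max_sample_size then unique
  else
    -- seen = Counter(); for pred, obj in unique: ranked.append((seen[pred], pred, obj)); seen[pred] += 1
    let ranked := (unique.foldl
      (fun (st : PySem.Dict String Int × List (Int × String × String)) p =>
        (st.1.modify p.1 0 (· + 1), st.2 ++ [(st.1.getD p.1 0, p.1, p.2)]))
      (PySem.Dict.empty, [])).2
    -- ranked.sort(key=lambda t: (t[0], t[1])); return [(p, o) for _, p, o in ranked[:max(0, k)]]
    ((PySem.List.sorted2 ranked (fun t => t.1) (fun t => t.2.1) false).take
        (max 0 max_sample_size).toNat).map (fun t => (t.2.1, t.2.2))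

-- ===== PRECONDITION & SPEC =====
-- Pre_ excludes only the inputs where Python A raises ValueError: an empty connection list
-- together with a negative max_sample_size (max() of an empty sequence).
def Pre_get_diversified_sample (connections : List (String × String)) (max_sample_size : Int) : Prop :=
  connections = [] → 0 ≤ max_sample_size
instance (connections : List (String × String)) (max_sample_size : Int) : Decidable (Pre_get_diversified_sample connections max_sample_size) := by unfold Pre_get_diversified_sample; infer_instance
def pvWitness_get_diversified_sample : (List (String × String)) × Int := ([("p", "a")], 0)

def Spec_get_diversified_sample (connections : List (String × String)) (max_sample_size : Int) (out : List (String × String)) : Prop := out = get_diversified_sample_alt connections max_sample_size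
instance (connections : List (String × String)) (max_sample_size : Int) (out : List (String × String)) : Decidable (Spec_get_diversified_sample connections max_sample_size out) := by unfold Spec_get_diversified_sample; infer_instance

-- ===== CLAIM (what is proved, stated in full; the proofs are below) =====
def Claim_equal_get_diversified_sample : Prop := ∀ (connections : List (String × String)) (max_sample_size : Int), Dom_get_diversified_sample connections max_sample_size → Pre_get_diversified_sample connections max_sample_size → Spec_get_diversified_sample connections max_sample_size (get_diversified_sample connections max_sample_size)

-- ===== LEMMAS AND PROOFS =====

-- ---- generic lexicographic order on two key projections ----
def pvLexLt {α κ₁ κ₂ : Type} [LinearOrder κ₁] [LinearOrder κ₂]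
    (k1 : α → κ₁) (k2 : α → κ₂) (a b : α) : Prop :=
  k1 a < k1 b ∨ (k1 a = k1 b ∧ k2 a < k2 b)

def pvLexLe {α κ₁ κ₂ : Type} [LinearOrder κ₁] [LinearOrder κ₂]
    (k1 : α → κ₁) (k2 : α → κ₂) (a b : α) : Prop :=
  pvLexLt k1 k2 a b ∨ (k1 a = k1 b ∧ k2 a = k2 b)

lemma pvC_true_iff {α κ₁ κ₂ : Type} [LinearOrder κ₁] [LinearOrder κ₂]
    (k1 : α → κ₁) (k2 : α → κ₂) (a b : α) :
    ((decide (k1 a < k1 b) || (!decide (k1 b < k1 a) && decide (k2 a < k2 b))) = true)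
      ↔ pvLexLt k1 k2 a b := by
  simp only [Bool.or_eq_true, Bool.and_eq_true, Bool.not_eq_true', decide_eq_true_eq,
    decide_eq_false_iff_not, pvLexLt]
  constructor
  · rintro (h | ⟨h1, h2⟩)
    · exact Or.inl h
    · rcases lt_trichotomy (k1 a) (k1 b) with h' | h' | h'
      · exact Or.inl h'
      · exact Or.inr ⟨h', h2⟩
      · exact absurd h' h1
  · rintro (h | ⟨h1, h2⟩)
    · exact Or.inl h
    · exact Or.inr ⟨by rw [h1]; exact lt_irrefl _, h2⟩

lemma pvLexLe_of_not_lt {α κ₁ κ₂ : Type} [LinearOrder κ₁] [LinearOrder κ₂]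
    (k1 : α → κ₁) (k2 : α → κ₂) {a b : α} (h : ¬ pvLexLt k1 k2 a b) :
    pvLexLe k1 k2 b a := by
  unfold pvLexLt at h
  rcases lt_trichotomy (k1 a) (k1 b) with h' | h' | h'
  · exact absurd (Or.inl h') h
  · rcases lt_trichotomy (k2 a) (k2 b) with h2 | h2 | h2
    · exact absurd (Or.inr ⟨h', h2⟩) h
    · exact Or.inr ⟨h'.symm, h2.symm⟩
    · exact Or.inl (Or.inr ⟨h'.symm, h2⟩)
  · exact Or.inl (Or.inl h')

lemma pvLexLt_trans_le {α κ₁ κ₂ : Type} [LinearOrder κ₁] [LinearOrder κ₂]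
    (k1 : α → κ₁) (k2 : α → κ₂) {a b c : α}
    (h1 : pvLexLt k1 k2 a b) (h2 : pvLexLe k1 k2 b c) : pvLexLt k1 k2 a c := by
  rcases h2 with h2 | ⟨e1, e2⟩
  · rcases h1 with h1 | ⟨f1, f2⟩ <;> rcases h2 with h2 | ⟨g1, g2⟩
    · exact Or.inl (lt_trans h1 h2)
    · exact Or.inl (g1 ▸ h1)
    · exact Or.inl (f1 ▸ h2)
    · exact Or.inr ⟨f1.trans g1, lt_trans f2 g2⟩
  · rcases h1 with h1 | ⟨f1, f2⟩
    · exact Or.inl (e1 ▸ h1)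
    · exact Or.inr ⟨f1.trans e1, e2 ▸ f2⟩

lemma pvLexLt_not_le {α κ₁ κ₂ : Type} [LinearOrder κ₁] [LinearOrder κ₂]
    (k1 : α → κ₁) (k2 : α → κ₂) {a b : α}
    (h : pvLexLt k1 k2 a b) : ¬ pvLexLe k1 k2 b a := by
  intro hle
  have := pvLexLt_trans_le k1 k2 h hle
  rcases this with h' | ⟨h1, h2⟩
  · exact lt_irrefl _ h'
  · exact lt_irrefl _ h2

lemma pvInsertBy_pairwise {α κ₁ κ₂ : Type} [LinearOrder κ₁] [LinearOrder κ₂]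
    (k1 : α → κ₁) (k2 : α → κ₂) (x : α) (ys : List α)
    (h : ys.Pairwise (pvLexLe k1 k2)) :
    (PySem.List.insertBy
      (fun a b => decide (k1 a < k1 b) || (!decide (k1 b < k1 a) && decide (k2 a < k2 b)))
      x ys).Pairwise (pvLexLe k1 k2) := by
  induction ys with
  | nil => simp [PySem.List.insertBy]
  | cons y ys ih =>
    rcases List.pairwise_cons.mp h with ⟨hy, hys⟩
    by_cases hc : (decide (k1 x < k1 y) || (!decide (k1 y < k1 x) && decide (k2 x < k2 y))) = true
    · have hlt : pvLexLt k1 k2 x y := (pvC_true_iff k1 k2 x y).mp hc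
      rw [PySem.List.insertBy, if_pos hc]
      refine List.pairwise_cons.mpr ⟨?_, h⟩
      intro z hz
      rcases List.mem_cons.mp hz with rfl | hz
      · exact Or.inl hlt
      · exact Or.inl (pvLexLt_trans_le k1 k2 hlt (hy z hz))
    · have hle : pvLexLe k1 k2 y x :=
        pvLexLe_of_not_lt k1 k2 (fun hlt => hc ((pvC_true_iff k1 k2 x y).mpr hlt))
      rw [PySem.List.insertBy, if_neg hc]
      refine List.pairwise_cons.mpr ⟨?_, ih hys⟩
      intro z hz
      rcases (PySem.List.mem_insertBy _ x z ys).mp hz with rfl | hz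
      · exact hle
      · exact hy z hz

lemma pvFoldlInsertBy_pairwise {α κ₁ κ₂ : Type} [LinearOrder κ₁] [LinearOrder κ₂]
    (k1 : α → κ₁) (k2 : α → κ₂) (xs : List α) :
    ∀ acc, acc.Pairwise (pvLexLe k1 k2) →
      (xs.foldl (fun acc x => PySem.List.insertBy
        (fun a b => decide (k1 a < k1 b) || (!decide (k1 b < k1 a) && decide (k2 a < k2 b)))
        x acc) acc).Pairwise (pvLexLe k1 k2) := by
  induction xs with
  | nil => intro acc h; exact h
  | cons x xs ih =>
    intro acc h
    exact ih _ (pvInsertBy_pairwise k1 k2 x acc h)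

lemma pvSorted2_eq_foldl {α κ₁ κ₂ : Type} [LinearOrder κ₁] [LinearOrder κ₂]
    (xs : List α) (k1 : α → κ₁) (k2 : α → κ₂) :
    PySem.List.sorted2 xs k1 k2 false
      = xs.foldl (fun acc x => PySem.List.insertBy
          (fun a b => decide (k1 a < k1 b) || (!decide (k1 b < k1 a) && decide (k2 a < k2 b)))
          x acc) [] := rfl

lemma pvSorted2_pairwise_le {α κ₁ κ₂ : Type} [LinearOrder κ₁] [LinearOrder κ₂]
    (xs : List α) (k1 : α → κ₁) (k2 : α → κ₂) :
    (PySem.List.sorted2 xs k1 k2 false).Pairwise (pvLexLe k1 k2) := by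
  rw [pvSorted2_eq_foldl]
  exact pvFoldlInsertBy_pairwise k1 k2 xs [] (List.Pairwise.nil)

lemma pvEq_of_perm_le_lt {α κ₁ κ₂ : Type} [LinearOrder κ₁] [LinearOrder κ₂]
    (k1 : α → κ₁) (k2 : α → κ₂) :
    ∀ (l2 l1 : List α), l1.Perm l2 → l1.Pairwise (pvLexLe k1 k2) →
      l2.Pairwise (pvLexLt k1 k2) → l1 = l2 := by
  intro l2
  induction l2 with
  | nil => intro l1 hp _ _; exact List.perm_nil.mp hp
  | cons y t2 ih =>
    intro l1 hp h1 h2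
    cases l1 with
    | nil => exact absurd hp.symm (by simp)
    | cons z t1 =>
      rcases List.pairwise_cons.mp h1 with ⟨hz, ht1⟩
      rcases List.pairwise_cons.mp h2 with ⟨hy, ht2⟩
      have hzy : z = y := by
        by_contra hne
        have hyz : y ∈ z :: t1 := hp.mem_iff.mpr (List.mem_cons_self ..)
        have hzyt : z ∈ y :: t2 := hp.mem_iff.mp (List.mem_cons_self ..)
        rcases List.mem_cons.mp hyz with h' | hymem
        · exact hne h'.symm
        rcases List.mem_cons.mp hzyt with h' | hzmem
        · exact hne h'
        exact pvLexLt_not_le k1 k2 (hy z hzmem) (hz y hymem)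
      subst hzy
      have := ih t1 (hp.cons_inv) ht1 ht2
      rw [this]

lemma pvSorted2_eq_of_perm_of_pairwise_lt {α κ₁ κ₂ : Type} [LinearOrder κ₁] [LinearOrder κ₂]
    (xs ys : List α) (k1 : α → κ₁) (k2 : α → κ₂)
    (hp : ys.Perm xs) (hlt : ys.Pairwise (pvLexLt k1 k2)) :
    PySem.List.sorted2 xs k1 k2 false = ys :=
  pvEq_of_perm_le_lt k1 k2 ys (PySem.List.sorted2 xs k1 k2 false)
    ((PySem.List.sorted2_perm xs k1 k2 false).trans hp.symm)
    (pvSorted2_pairwise_le xs k1 k2) hlt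

-- unique = sorted(set(connections)) is strictly lexicographically increasing
lemma pvUnique_pairwise (connections : List (String × String)) :
    (PySem.List.sorted2 (PySem.Set.ofList connections) Prod.fst Prod.snd false).Pairwise
      (pvLexLt (Prod.fst (α := String) (β := String)) Prod.snd) := by
  have hperm := PySem.List.sorted2_perm (PySem.Set.ofList connections)
    (Prod.fst (α := String) (β := String)) Prod.snd false
  have hnd : (PySem.List.sorted2 (PySem.Set.ofList connections) Prod.fst Prod.snd false).Nodup :=
    hperm.nodup_iff.mpr (PySem.Set.nodup_ofList connections)
  have hle := pvSorted2_pairwise_le (PySem.Set.ofList connections)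
    (Prod.fst (α := String) (β := String)) Prod.snd
  refine (hle.and hnd).imp ?_
  rintro a b ⟨hle', hne⟩
  rcases hle' with h | ⟨h1, h2⟩
  · exact h
  · exact absurd (Prod.ext h1 h2) hne

-- ---- the predicate groups of u ----
def pvG (u : List (String × String)) (p : String) : List String :=
  (u.filter (fun q => q.1 == p)).map Prod.snd

def pvK (u : List (String × String)) : List String :=
  PySem.Set.ofList (u.map Prod.fst)

-- (k-th round-robin row of u, annotated with its round number)
def pvRowAnn (u : List (String × String)) (k : Nat) : List (Int × String × String) :=
  (pvK u).filterMap (fun p => (pvG u p)[k]?.map (fun o => ((k : Int), p, o)))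

-- rank-annotation of u as B's counting loop produces it
def pvAnn (d : PySem.Dict String Int) : List (String × String) → List (Int × String × String)
  | [] => []
  | p :: t => (d.getD p.1 0, p.1, p.2) :: pvAnn (d.modify p.1 0 (· + 1)) t

-- start-indexed annotation of one group
def pvIdx (s : Nat) (p : String) : List String → List (Int × String × String)
  | [] => []
  | o :: t => ((s : Int), p, o) :: pvIdx (s + 1) p t

def pvGrid (u : List (String × String)) : List (Int × String × String) :=
  (pvK u).flatMap (fun p => pvIdx 0 p (pvG u p))


-- ---- B's counting loop produces pvAnn ----
lemma pvRanked_eq (u : List (String × String)) :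
    ∀ (d : PySem.Dict String Int) (acc : List (Int × String × String)),
      (u.foldl (fun (st : PySem.Dict String Int × List (Int × String × String)) p =>
        (st.1.modify p.1 0 (· + 1), st.2 ++ [(st.1.getD p.1 0, p.1, p.2)])) (d, acc)).2
        = acc ++ pvAnn d u := by
  induction u with
  | nil => intro d acc; simp [pvAnn]
  | cons x t ih =>
    intro d acc
    simp only [List.foldl_cons, pvAnn]
    rw [ih]
    simp

lemma pvAnn_append (x : String × String) (u : List (String × String)) :
    ∀ d : PySem.Dict String Int,
      pvAnn d (u ++ [x])
        = pvAnn d u ++ [((u.foldl (fun d p => d.modify p.1 0 (· + 1)) d).getD x.1 0, x.1, x.2)] := by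
  induction u with
  | nil => intro d; simp [pvAnn]
  | cons y t ih =>
    intro d
    simp only [List.cons_append, pvAnn, List.foldl_cons]
    rw [ih]

lemma pvCounterFold (u : List (String × String)) (d : PySem.Dict String Int) (q : String) :
    (u.foldl (fun d p => d.modify p.1 0 (· + 1)) d).getD q 0
      = d.getD q 0 + (List.count q (u.map Prod.fst) : Int) := by
  have h : u.foldl (fun d p => d.modify p.1 0 (· + 1)) d
      = (u.map Prod.fst).foldl (fun d x => d.modify x 0 (· + 1)) d := by
    rw [List.foldl_map]
  rw [h]
  exact PySem.Dict.getD_foldl_modify_add_one (u.map Prod.fst) d q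

lemma pvCount_eq_lenG (u : List (String × String)) (a : String) :
    List.count a (u.map Prod.fst) = (pvG u a).length := by
  rw [List.count_eq_length_filter, List.filter_map, pvG]
  simp only [List.length_map]
  congr 1

-- ---- pvG / pvK / pvIdx step lemmas ----
lemma pvG_append (u : List (String × String)) (x : String × String) (p : String) :
    pvG (u ++ [x]) p = if x.1 = p then pvG u p ++ [x.2] else pvG u p := by
  by_cases h : x.1 = p
  · simp [pvG, List.filter_append, h]
  · simp [pvG, List.filter_append, h]

lemma pvK_append (u : List (String × String)) (x : String × String) :
    pvK (u ++ [x]) = PySem.Set.add (pvK u) x.1 := by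
  simp [pvK, PySem.Set.ofList, List.foldl_append]

lemma pvG_eq_nil (u : List (String × String)) (p : String) (h : p ∉ u.map Prod.fst) :
    pvG u p = [] := by
  unfold pvG
  rw [List.filter_eq_nil_iff.mpr]
  · rfl
  · intro q hq hbeq
    exact h (List.mem_map.mpr ⟨q, hq, beq_iff_eq.mp hbeq⟩)

lemma pvIdx_append (p : String) (o : String) (l : List String) :
    ∀ s : Nat, pvIdx s p (l ++ [o]) = pvIdx s p l ++ [(((s + l.length : Nat) : Int), p, o)] := by
  induction l with
  | nil => intro s; simp [pvIdx]
  | cons a t ih =>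
    intro s
    simp only [List.cons_append, pvIdx, ih (s + 1), List.cons_append]
    norm_num [Nat.add_assoc, Nat.add_comm 1 t.length]

-- ---- permutation toolbox ----
lemma pvPermShuffle {γ : Type} (a b A B : List γ) :
    ((a ++ b) ++ (A ++ B)).Perm ((a ++ A) ++ (b ++ B)) := by
  have h1 : ((b ++ A) ++ B).Perm ((A ++ b) ++ B) :=
    (List.perm_append_comm).append_right B
  have h2 := h1.append_left a
  simpa [List.append_assoc] using h2

lemma pvFlatMap_split {γ : Type} (l : List String) (f g : String → List γ) :
    (l.flatMap (fun p => f p ++ g p)).Perm (l.flatMap f ++ l.flatMap g) := by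
  induction l with
  | nil => simp
  | cons x t ih =>
    simp only [List.flatMap_cons]
    exact ((ih.append_left (f x ++ g x)).trans (pvPermShuffle (f x) (g x) _ _))

lemma pvFlatMap_bump {γ : Type} (l : List String) (hnd : l.Nodup) (q : String) (hq : q ∈ l)
    (f : String → List γ) (e : γ) :
    (l.flatMap (fun p => if p = q then f p ++ [e] else f p)).Perm (l.flatMap f ++ [e]) := by
  induction l with
  | nil => cases hq
  | cons k t ih =>
    rcases List.nodup_cons.mp hnd with ⟨hk, hndt⟩
    by_cases hkq : k = q
    · subst hkq
      have ht : t.flatMap (fun p => if p = k then f p ++ [e] else f p) = t.flatMap f :=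
        List.flatMap_congr (fun p hp => if_neg (fun h => hk (by rw [← h]; exact hp)))
      simp only [List.flatMap_cons, if_pos, ht]
      have := pvPermShuffle (f k) [e] (t.flatMap f) ([] : List γ)
      simpa using this
    · have hqt : q ∈ t := by
        rcases List.mem_cons.mp hq with h | h
        · exact absurd h.symm hkq
        · exact h
      simp only [List.flatMap_cons, if_neg hkq]
      have := (ih hndt hqt).append_left (f k)
      simpa [List.append_assoc] using this

lemma pvFlatMap_toList {γ : Type} (l : List String) (f : String → Option γ) :
    l.flatMap (fun p => (f p).toList) = l.filterMap f := by
  induction l with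
  | nil => simp
  | cons x t ih =>
    cases h : f x <;> simp [List.flatMap_cons, h, ih]

-- ---- the annotation of u is a permutation of the grid ----
lemma pvSetContains (s : PySem.Set String) (x : String) :
    (PySem.Set.contains s x = true) ↔ x ∈ s := by
  simp [PySem.Set.contains]

lemma pvAnn_perm_grid (u : List (String × String)) :
    (pvAnn PySem.Dict.empty u).Perm (pvGrid u) := by
  induction u using List.reverseRecOn with
  | nil => simp [pvAnn, pvGrid, pvK, PySem.Set.ofList, PySem.Set.empty]
  | append_singleton u x ih =>
    have hcnt : pvAnn PySem.Dict.empty (u ++ [x])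
        = pvAnn PySem.Dict.empty u ++ [(((pvG u x.1).length : Int), x.1, x.2)] := by
      rw [pvAnn_append, pvCounterFold, pvCount_eq_lenG]
      simp [PySem.Dict.getD_empty]
    by_cases hx : x.1 ∈ pvK u
    · -- key already present: its group grows by one at the end
      have hK : pvK (u ++ [x]) = pvK u := by
        rw [pvK_append, PySem.Set.add, if_pos ((pvSetContains _ _).mpr hx)]
      have hfun : ∀ p ∈ pvK u,
          pvIdx 0 p (pvG (u ++ [x]) p)
            = (if p = x.1
                then pvIdx 0 p (pvG u p) ++ [(((pvG u x.1).length : Int), x.1, x.2)]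
                else pvIdx 0 p (pvG u p)) := by
        intro p _
        by_cases hp : p = x.1
        · subst hp
          rw [pvG_append, if_pos rfl, pvIdx_append, if_pos rfl]
          simp
        · rw [pvG_append, if_neg (fun h => hp h.symm), if_neg hp]
      have : pvGrid (u ++ [x])
          = (pvK u).flatMap (fun p => if p = x.1
              then pvIdx 0 p (pvG u p) ++ [(((pvG u x.1).length : Int), x.1, x.2)]
              else pvIdx 0 p (pvG u p)) := by
        unfold pvGrid
        rw [hK]
        exact List.flatMap_congr hfun
      rw [hcnt, this]
      have hperm := pvFlatMap_bump (pvK u) (PySem.Set.nodup_ofList _) x.1 hx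
        (fun p => pvIdx 0 p (pvG u p)) (((pvG u x.1).length : Int), x.1, x.2)
      exact (ih.append_right _).trans hperm.symm
    · -- fresh key: a new singleton group is appended
      have hxm : x.1 ∉ u.map Prod.fst := fun h => hx ((PySem.Set.mem_ofList _ _).mpr h)
      have hK : pvK (u ++ [x]) = pvK u ++ [x.1] := by
        rw [pvK_append, PySem.Set.add,
          if_neg (fun h => hx ((pvSetContains _ _).mp h))]
      have hGnil : pvG u x.1 = [] := pvG_eq_nil u x.1 hxm
      have hgrid : pvGrid (u ++ [x]) = pvGrid u ++ [((0 : Int), x.1, x.2)] := by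
        unfold pvGrid
        rw [hK, List.flatMap_append]
        congr 1
        · exact List.flatMap_congr (fun p hp => by
            rw [pvG_append, if_neg (fun h => hx (by rw [h]; exact hp))])
        · simp only [List.flatMap_cons, List.flatMap_nil, List.append_nil]
          rw [pvG_append, if_pos rfl, hGnil]
          simp [pvIdx]
      rw [hcnt, hgrid, hGnil]
      exact ih.append_right _

-- ---- the grid is a permutation of the concatenated round-robin rows ----
def pvGridFrom (u : List (String × String)) (k : Nat) : List (Int × String × String) :=
  (pvK u).flatMap (fun p => pvIdx k p ((pvG u p).drop k))

lemma pvIdx_drop_step (p : String) (l : List String) (k : Nat) :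
    pvIdx k p (l.drop k)
      = (l[k]?.map (fun o => ((k : Int), p, o))).toList ++ pvIdx (k + 1) p (l.drop (k + 1)) := by
  by_cases h : k < l.length
  · rw [List.drop_eq_getElem_cons h, List.getElem?_eq_getElem h]
    simp [pvIdx]
  · have h1 : l.drop k = [] := List.drop_eq_nil_of_le (by omega)
    have h2 : l.drop (k + 1) = [] := List.drop_eq_nil_of_le (by omega)
    rw [h1, h2, List.getElem?_eq_none (by omega)]
    simp [pvIdx]

lemma pvGridFrom_perm (u : List (String × String)) (M : Nat)
    (hb : ∀ p, (pvG u p).length ≤ M) :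
    ∀ (n k : Nat), k + n = M →
      (pvGridFrom u k).Perm (((List.range' k n).map (pvRowAnn u)).flatten) := by
  intro n
  induction n with
  | zero =>
    intro k hk
    have : pvGridFrom u k = [] := by
      unfold pvGridFrom
      rw [List.flatMap_congr (g := fun _ => ([] : List (Int × String × String)))
        (fun p _ => by rw [List.drop_eq_nil_of_le (by have := hb p; omega)]; rfl)]
      simp
    rw [this]
    simp
  | succ n ih =>
    intro k hk
    have hstep : pvGridFrom u k
        = (pvK u).flatMap (fun p =>
            ((pvG u p)[k]?.map (fun o => ((k : Int), p, o))).toList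
              ++ pvIdx (k + 1) p ((pvG u p).drop (k + 1))) := by
      unfold pvGridFrom
      exact List.flatMap_congr (fun p _ => pvIdx_drop_step p (pvG u p) k)
    have hsplit := pvFlatMap_split (pvK u)
      (fun p => ((pvG u p)[k]?.map (fun o => ((k : Int), p, o))).toList)
      (fun p => pvIdx (k + 1) p ((pvG u p).drop (k + 1)))
    have hrow : (pvK u).flatMap
        (fun p => ((pvG u p)[k]?.map (fun o => ((k : Int), p, o))).toList) = pvRowAnn u k :=
      pvFlatMap_toList _ _
    have hrec := ih (k + 1) (by omega)
    rw [hstep, List.range'_succ, List.map_cons, List.flatten_cons]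
    refine hsplit.trans ?_
    rw [hrow]
    exact hrec.append_left (pvRowAnn u k)


-- ---- strict order of the concatenated rows (for naming B's sort) ----
lemma pvOfList_pairwise_le (l : List String) (h : l.Pairwise (· ≤ ·)) :
    (PySem.Set.ofList l : List String).Pairwise (· ≤ ·) := by
  induction l using List.reverseRecOn with
  | nil => simp [PySem.Set.ofList, PySem.Set.empty]
  | append_singleton l a ih =>
    rcases List.pairwise_append.mp h with ⟨hl, _, hla⟩
    have hof := ih hl
    have hadd : PySem.Set.ofList (l ++ [a]) = PySem.Set.add (PySem.Set.ofList l) a := by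
      simp [PySem.Set.ofList, List.foldl_append]
    rw [hadd, PySem.Set.add]
    by_cases hc : PySem.Set.contains (PySem.Set.ofList l) a = true
    · rw [if_pos hc]; exact hof
    · rw [if_neg hc]
      refine List.pairwise_append.mpr ⟨hof, by simp, ?_⟩
      intro y hy z hz
      rw [List.mem_singleton.mp hz]
      exact hla y ((PySem.Set.mem_ofList l y).mp hy) a (List.mem_singleton_self a)

lemma pvK_pairwise_lt (u : List (String × String))
    (hu : u.Pairwise (pvLexLt (Prod.fst (α := String) (β := String)) Prod.snd)) :
    (pvK u).Pairwise (· < ·) := by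
  have hle : (u.map Prod.fst).Pairwise (· ≤ ·) := by
    rw [List.pairwise_map]
    refine hu.imp ?_
    rintro a b (h | ⟨h, _⟩)
    · exact le_of_lt h
    · exact le_of_eq h
  have hof := pvOfList_pairwise_le _ hle
  have hnd : (pvK u).Nodup := PySem.Set.nodup_ofList _
  refine (hof.and hnd).imp ?_
  rintro a b ⟨h1, h2⟩
  exact lt_of_le_of_ne h1 h2

lemma pvRowAnn_rank (u : List (String × String)) (k : Nat) :
    ∀ t ∈ pvRowAnn u k, t.1 = (k : Int) := by
  intro t ht
  rcases List.mem_filterMap.mp ht with ⟨p, _, hsome⟩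
  rcases Option.map_eq_some_iff.mp hsome with ⟨o, _, rfl⟩
  rfl

lemma pvRowAnn_pairwise (u : List (String × String)) (k : Nat)
    (hK : (pvK u).Pairwise (· < ·)) :
    (pvRowAnn u k).Pairwise
      (pvLexLt (fun t : Int × String × String => t.1) (fun t => t.2.1)) := by
  unfold pvRowAnn
  rw [List.pairwise_filterMap]
  refine hK.imp ?_
  intro p p' hpp' b hb b' hb'
  rcases Option.map_eq_some_iff.mp hb with ⟨o, _, rfl⟩
  rcases Option.map_eq_some_iff.mp hb' with ⟨o', _, rfl⟩
  exact Or.inr ⟨rfl, hpp'⟩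

lemma pvFlattenAnn_pairwise (u : List (String × String)) (M : Nat)
    (hK : (pvK u).Pairwise (· < ·)) :
    (((List.range' 0 M).map (pvRowAnn u)).flatten).Pairwise
      (pvLexLt (fun t : Int × String × String => t.1) (fun t => t.2.1)) := by
  rw [List.pairwise_flatten]
  constructor
  · intro l hl
    rcases List.mem_map.mp hl with ⟨k, _, rfl⟩
    exact pvRowAnn_pairwise u k hK
  · rw [List.pairwise_map, ← List.range_eq_range']
    refine List.pairwise_lt_range.imp ?_
    intro k k' hkk' x hx y hy
    have hxr := pvRowAnn_rank u k x hx
    have hyr := pvRowAnn_rank u k' y hy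
    exact Or.inl (by show x.1 < y.1; rw [hxr, hyr]; exact_mod_cast hkk')

-- ---- A's nested loops compute "take of the concatenated rows" ----
def pvRowOf (its : List (String × List String)) (i : Nat) : List (String × String) :=
  its.filterMap (fun pv => pv.2[i]?.map (fun o => (pv.1, o)))

lemma pvInner_take (d : PySem.Dict String (List String)) (m : Int) (i : Nat) :
    ∀ (its : List (String × List String)) (s : List (String × String)),
      (∀ pv ∈ its, PySem.Dict.getD d pv.1 [] = pv.2) → (s.length : Int) < m →
      pvAInner d m i (its.map Prod.fst) s
        = s ++ (pvRowOf its i).take (m - s.length).toNat := by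
  intro its
  induction its with
  | nil => intro s _ _; simp [pvAInner, pvRowOf]
  | cons pv t ih =>
    intro s hget hs
    have hpv : PySem.Dict.getD d pv.1 [] = pv.2 := hget pv (List.mem_cons_self ..)
    have ht : ∀ q ∈ t, PySem.Dict.getD d q.1 [] = q.2 :=
      fun q hq => hget q (List.mem_cons_of_mem _ hq)
    simp only [List.map_cons, pvAInner, hpv, pvRowOf, List.filterMap_cons]
    by_cases hlt : i < pv.2.length
    · rw [dif_pos hlt]
      rw [List.getElem?_eq_getElem hlt]
      simp only [Option.map_some]
      by_cases hfull : m ≤ ((s ++ [(pv.1, pv.2[i])]).length : Int)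
      · rw [if_pos hfull]
        have hr : (m - (s.length : Int)).toNat = 1 := by
          simp only [List.length_append, List.length_cons, List.length_nil] at hfull
          omega
        rw [hr]
        simp
      · rw [if_neg hfull]
        have hs' : (((s ++ [(pv.1, pv.2[i])]).length : Nat) : Int) < m := by
          simp only [List.length_append, List.length_cons, List.length_nil] at hfull ⊢
          omega
        rw [ih _ ht hs']
        have hr : (m - (s.length : Int)).toNat
            = ((m - ((s ++ [(pv.1, pv.2[i])]).length : Int)).toNat) + 1 := by
          simp only [List.length_append, List.length_cons, List.length_nil]
          push_cast
          omega
        rw [hr, List.take_succ_cons]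
        simp [pvRowOf]
    · rw [dif_neg hlt]
      rw [List.getElem?_eq_none (by omega)]
      simp only [Option.map_none]
      exact ih s ht hs

lemma pvOuter_take (d : PySem.Dict String (List String)) (m : Int)
    (hget : ∀ pv ∈ d.items, PySem.Dict.getD d pv.1 [] = pv.2) :
    ∀ (n k : Nat) (s : List (String × String)),
      pvAOuter d m d.keys (List.range' k n) s
        = s ++ (((List.range' k n).map (fun i => pvRowOf d.items i)).flatten).take
            (m - s.length).toNat := by
  intro n
  induction n with
  | zero => intro k s; simp [pvAOuter]
  | succ n ih =>
    intro k s
    rw [List.range'_succ]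
    simp only [pvAOuter]
    by_cases hfull : m ≤ (s.length : Int)
    · rw [if_pos hfull]
      have : (m - (s.length : Int)).toNat = 0 := by omega
      rw [this]
      simp
    · rw [if_neg hfull]
      have hkeys : d.keys = d.items.map Prod.fst := rfl
      have hinner := pvInner_take d m k d.items s hget (by omega)
      rw [hkeys, hinner, ← hkeys, ih (k + 1)]
      rw [List.map_cons, List.flatten_cons, List.take_append]
      set r := (m - (s.length : Int)).toNat with hr
      set row := pvRowOf d.items k with hrow
      have hlen : (s ++ row.take r).length = s.length + min r row.length := by
        simp
      have hr' : (m - (((s ++ row.take r).length : Nat) : Int)).toNat = r - row.length := by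
        rw [hlen]
        push_cast
        omega
      rw [hr', List.append_assoc]

-- ===== VERDICT (by name: the statement is the Claim_ definition above) =====
theorem get_diversified_sample_spec : Claim_equal_get_diversified_sample := by
  intro connections m _hdom hpre
  unfold Spec_get_diversified_sample get_diversified_sample get_diversified_sample_alt
  set u := PySem.List.sorted2 (PySem.Set.ofList connections) Prod.fst Prod.snd false with hu
  by_cases hle : (u.length : Int) ≤ m
  · simp [hle]
  · simp only [if_neg hle]
    set d := u.foldl (fun d p => PySem.Dict.modify d p.1 [] (· ++ [p.2]))
      PySem.Dict.empty with hd
    have hkeys : d.keys = pvK u := by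
      rw [hd, PySem.Dict.keys_foldl_modify_key]
      simp [PySem.Set.update, pvK, PySem.Set.ofList, PySem.Set.empty]
    have hnd : d.keys.Nodup := by rw [hkeys]; exact PySem.Set.nodup_ofList _
    have hG : ∀ p, d.getD p [] = pvG u p := by
      intro p
      rw [hd, PySem.Dict.getD_foldl_modify_append]
      simp [pvG]
    have hget : ∀ pv ∈ d.items, PySem.Dict.getD d pv.1 [] = pv.2 :=
      fun pv hpv => PySem.Dict.getD_of_mem_items d hpv hnd []
    have hranked : (u.foldl
        (fun (st : PySem.Dict String Int × List (Int × String × String)) p =>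
          (st.1.modify p.1 0 (· + 1), st.2 ++ [(st.1.getD p.1 0, p.1, p.2)]))
        (PySem.Dict.empty, [])).2 = pvAnn PySem.Dict.empty u := by
      rw [pvRanked_eq]
      simp
    cases hmax : PySem.List.max? (d.values.map (fun v => (v.length : Int))) (fun x => x) with
    | none =>
      exfalso
      have hvals : d.values = [] :=
        List.map_eq_nil_iff.mp ((PySem.List.max?_eq_none_iff _ _).mp hmax)
      have hitems : d.items = [] := List.map_eq_nil_iff.mp hvals
      have hK : pvK u = [] := by
        rw [← hkeys]
        show d.items.map Prod.fst = []
        rw [hitems]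
        rfl
      have hun : u = [] := by
        rw [List.eq_nil_iff_forall_not_mem]
        intro q hq
        have : q.1 ∈ pvK u :=
          (PySem.Set.mem_ofList _ _).mpr (List.mem_map_of_mem hq)
        rw [hK] at this
        cases this
      have hconn : connections = [] := by
        rw [List.eq_nil_iff_forall_not_mem]
        intro q hq
        have h1 : q ∈ PySem.Set.ofList connections := (PySem.Set.mem_ofList _ _).mpr hq
        have h2 : q ∈ u := (PySem.List.sorted2_perm (PySem.Set.ofList connections)
          Prod.fst Prod.snd false).symm.mem_iff.mp h1
        rw [hun] at h2
        cases h2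
      have := hpre hconn
      rw [hun] at hle
      simp at hle
      omega
    | some M =>
      have hub : ∀ p, (pvG u p).length ≤ M.toNat := by
        intro p
        by_cases hp : p ∈ pvK u
        · have hpK : p ∈ d.keys := by rw [hkeys]; exact hp
          have hv : pvG u p ∈ d.values := by
            rw [PySem.Dict.values_eq_map_keys d hnd []]
            exact List.mem_map.mpr ⟨p, hpK, hG p⟩
          have := PySem.List.max?_isMax hmax (((pvG u p).length : Int))
            (List.mem_map.mpr ⟨_, hv, rfl⟩)
          simp only at this
          omega
        · rw [pvG_eq_nil u p (fun h => hp ((PySem.Set.mem_ofList _ _).mpr h))]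
          simp
      have hrow : ∀ i, pvRowOf d.items i
          = (pvRowAnn u i).map (fun t => (t.2.1, t.2.2)) := by
        intro i
        unfold pvRowOf pvRowAnn
        rw [PySem.Dict.items_eq_map_keys d hnd [], List.filterMap_map, hkeys,
          List.map_filterMap]
        refine List.filterMap_congr ?_
        intro p _
        simp only [Function.comp, hG p, Option.map_map]
        rfl
      have hg0 : pvGridFrom u 0 = pvGrid u := by
        unfold pvGridFrom pvGrid
        exact List.flatMap_congr (fun p _ => by rw [List.drop_zero])
      have hperm : (((List.range' 0 M.toNat).map (pvRowAnn u)).flatten).Perm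
          (pvAnn PySem.Dict.empty u) := by
        have h1 := pvGridFrom_perm u M.toNat hub M.toNat 0 (by omega)
        rw [hg0] at h1
        exact h1.symm.trans (pvAnn_perm_grid u).symm
      have hsorted : PySem.List.sorted2 (pvAnn PySem.Dict.empty u)
            (fun t => t.1) (fun t => t.2.1) false
          = ((List.range' 0 M.toNat).map (pvRowAnn u)).flatten :=
        pvSorted2_eq_of_perm_of_pairwise_lt _ _ _ _ hperm
          (pvFlattenAnn_pairwise u M.toNat (pvK_pairwise_lt u (pvUnique_pairwise connections)))
      show pvAOuter d m d.keys (List.range M.toNat) [] = _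
      rw [List.range_eq_range', pvOuter_take d m hget M.toNat 0 [], hranked, hsorted]
      have hmaps : (List.range' 0 M.toNat).map (fun i => pvRowOf d.items i)
          = ((List.range' 0 M.toNat).map (pvRowAnn u)).map
              (List.map (fun t : Int × String × String => (t.2.1, t.2.2))) := by
        rw [List.map_map]
        exact List.map_congr_left (fun i _ => hrow i)
      have hm0 : ((max 0 m).toNat : Nat) = m.toNat := by omega
      rw [hmaps, ← List.map_flatten, ← List.map_take, hm0]
      simp
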